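-- pv_equiv track=rewrite | github.com/austburn/advent-of-code-17 | 3/main.py | determine_layer
-- ===== SOURCE A (Python) =====
-- def determine_layer(num):
--     layer_range = [1]
--     current_layer = 0
--     while num not in layer_range:
--         nums_per_side = int(len(layer_range)/4) + 1
--         nums_in_next_layer = (nums_per_side * 4) + 4
--         # add one as stop is not included in range
--         layer_range = range(layer_range[-1] + 1, layer_range[-1] + nums_in_next_layer + 1)
--         current_layer += 1
--     return current_layer, list(layer_range)
-- ===== SOURCE B (Python) =====
-- def determine_layer(num):
--     if num == 1:
--         return 0, [1]
--     k = 1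
--     while (2 * k + 1) ** 2 < num:
--         k += 1
--     low = (2 * k - 1) ** 2 + 1
--     high = (2 * k + 1) ** 2
--     return k, list(range(low, high + 1))
-- ===== Notes on version B (the rewrite author's own statement) =====
-- stated objective: simpler
-- what changed: B never builds or scans the intermediate rings: it finds the layer k with a pure arithmetic test (2k+1)^2 < num on a single integer counter and materialises only the final ring as one range, instead of A's loop that rebuilds a range object per ring and decides by membership and by the length/last element of the previous ring.
-- outside the precondition, e.g. on determine_layer(0): A does not finish within the time limit, B returns (1, [2, 3, 4, 5, 6, 7, 8, 9])
import Mathlib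
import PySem

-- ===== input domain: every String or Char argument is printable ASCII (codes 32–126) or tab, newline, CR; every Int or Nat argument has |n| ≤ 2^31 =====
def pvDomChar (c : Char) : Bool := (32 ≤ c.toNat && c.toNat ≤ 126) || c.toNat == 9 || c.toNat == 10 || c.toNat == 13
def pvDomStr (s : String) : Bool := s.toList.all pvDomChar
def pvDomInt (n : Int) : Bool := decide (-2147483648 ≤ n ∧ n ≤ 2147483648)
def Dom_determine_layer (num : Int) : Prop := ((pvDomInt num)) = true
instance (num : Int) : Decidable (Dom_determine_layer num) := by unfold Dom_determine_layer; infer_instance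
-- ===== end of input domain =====

-- B finds the spiral layer with a single integer counter and an arithmetic test,
-- building only the final ring, instead of A's per-ring range rebuilding; objective: simpler.

-- ===== PORT A =====
-- The while loop, with fuel making it total (A diverges for num ≤ 0 — excluded by Pre_;
-- under Pre_ the fuel num.toNat + 1 is proved sufficient below).
-- layer_range[-1] is taken with pyGetD default 0; the list is never empty, so the default is never used.
def pvALoop (num : Int) : Nat → Int × List Int → Int × List Int
  | 0, st => st
  | f + 1, (c, xs) =>
    if num ∈ xs then (c, xs)
    else
      let nps : Int := ((xs.length / 4 : Nat) : Int) + 1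
      let nn : Int := nps * 4 + 4
      let last : Int := PySem.List.pyGetD xs (-1) 0
      pvALoop num f (c + 1, PySem.List.pyRange (last + 1) (last + nn + 1) 1)

def determine_layer (num : Int) : Int × List Int :=
  pvALoop num (num.toNat + 1) (0, [1])

-- ===== PORT B =====
def pvBLoop (num : Int) : Nat → Int → Int
  | 0, k => k
  | f + 1, k => if (2 * k + 1) ^ 2 < num then pvBLoop num f (k + 1) else k

def determine_layer_alt (num : Int) : Int × List Int :=
  if num = 1 then (0, [1])
  else
    let k := pvBLoop num num.toNat 1
    (k, PySem.List.pyRange ((2 * k - 1) ^ 2 + 1) ((2 * k + 1) ^ 2 + 1) 1)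

-- ===== PRECONDITION & SPEC =====
-- A's while loop never terminates for num ≤ 0 (no ring ever contains such num): Pre_ excludes exactly those.
def Pre_determine_layer (num : Int) : Prop := 1 ≤ num
instance (num : Int) : Decidable (Pre_determine_layer num) := by unfold Pre_determine_layer; infer_instance
def pvWitness_determine_layer : Int := (10)
def Spec_determine_layer (num : Int) (out : Int × List Int) : Prop := out = determine_layer_alt num
instance (num : Int) (out : Int × List Int) : Decidable (Spec_determine_layer num out) := by unfold Spec_determine_layer; infer_instance

-- ===== CLAIM (what is proved, stated in full; the proofs are below) =====
def Claim_equal_determine_layer : Prop := ∀ (num : Int), Dom_determine_layer num → Pre_determine_layer num → Spec_determine_layer num (determine_layer num)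

-- ===== LEMMAS AND PROOFS =====

-- ring c : the list of numbers of spiral layer c (for c ≥ 1)
def pvRing (c : Int) : List Int :=
  PySem.List.pyRange ((2 * c - 1) ^ 2 + 1) ((2 * c + 1) ^ 2 + 1) 1

def pvIsLayer (num k : Int) : Prop :=
  1 ≤ k ∧ (2 * k - 1) ^ 2 < num ∧ num ≤ (2 * k + 1) ^ 2

theorem pvIsLayer_uniq {num k k' : Int} (h : pvIsLayer num k) (h' : pvIsLayer num k') : k = k' := by
  obtain ⟨hk1, hk2, hk3⟩ := h
  obtain ⟨hk1', hk2', hk3'⟩ := h'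
  by_contra hne
  rcases lt_or_gt_of_ne hne with hlt | hlt
  · have : (2 * k + 1) ^ 2 ≤ (2 * k' - 1) ^ 2 := by nlinarith
    omega
  · have : (2 * k' + 1) ^ 2 ≤ (2 * k - 1) ^ 2 := by nlinarith
    omega

theorem pvBLoop_spec (num : Int) : ∀ (f : Nat) (k : Int), 1 ≤ k → (2 * k - 1) ^ 2 < num →
    num ≤ (2 * (k + f) + 1) ^ 2 → pvIsLayer num (pvBLoop num f k) := by
  intro f
  induction f with
  | zero =>
    intro k h1 h2 h3
    simpa using ⟨h1, h2, by simpa using h3⟩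
  | succ f ih =>
    intro k h1 h2 h3
    simp only [pvBLoop]
    split_ifs with h
    · exact ih (k + 1) (by omega) (by ring_nf; ring_nf at h; omega) (by push_cast at h3; nlinarith)
    · exact ⟨h1, h2, by omega⟩

theorem pvMem_ring (num c : Int) : num ∈ pvRing c ↔ (2 * c - 1) ^ 2 < num ∧ num ≤ (2 * c + 1) ^ 2 := by
  unfold pvRing
  rw [PySem.List.mem_pyRange_one]
  omega

theorem pvRing_last (c : Int) (hc : 1 ≤ c) :
    PySem.List.pyGetD (pvRing c) (-1) 0 = (2 * c + 1) ^ 2 := by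
  unfold pvRing
  have hle : (2 * c - 1) ^ 2 + 1 ≤ (2 * c + 1) ^ 2 := by nlinarith
  rw [PySem.List.pyRange_one_succ_right hle]
  simp [PySem.List.pyGetD_neg_one_append_singleton]

theorem pvRing_length (c : Int) (hc : 1 ≤ c) : ((pvRing c).length : Int) = 8 * c := by
  unfold pvRing
  rw [PySem.List.length_pyRange_one]
  have : (2 * c + 1) ^ 2 + 1 - ((2 * c - 1) ^ 2 + 1) = 8 * c := by ring
  rw [this]
  omega

theorem pvALoop_spec (num : Int) : ∀ (f : Nat) (c : Int), 1 ≤ c → (2 * c - 1) ^ 2 < num →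
    num ≤ (2 * (c + f) + 1) ^ 2 → ∀ k, pvIsLayer num k →
    pvALoop num f (c, pvRing c) = (k, pvRing k) := by
  intro f
  induction f with
  | zero =>
    intro c h1 h2 h3 k hk
    have : c = k := pvIsLayer_uniq ⟨h1, h2, by simpa using h3⟩ hk
    simp [pvALoop, this]
  | succ f ih =>
    intro c h1 h2 h3 k hk
    simp only [pvALoop]
    split_ifs with hmem
    · have hc : pvIsLayer num c := by
        rw [pvMem_ring] at hmem
        exact ⟨h1, hmem.1, hmem.2⟩
      rw [pvIsLayer_uniq hc hk]
    · have hgt : (2 * c + 1) ^ 2 < num := by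
        rw [pvMem_ring] at hmem
        omega
      have hlen : ((pvRing c).length : Int) = 8 * c := pvRing_length c h1
      have hnps : (((pvRing c).length / 4 : Nat) : Int) + 1 = 2 * c + 1 := by
        have h4 : (pvRing c).length = (8 * c).toNat := by omega
        rw [h4, show (8 * c).toNat = 4 * (2 * c).toNat by omega]
        rw [Nat.mul_div_cancel_left _ (by norm_num)]
        omega
      rw [hnps, pvRing_last c h1]
      have hnext : PySem.List.pyRange ((2 * c + 1) ^ 2 + 1) ((2 * c + 1) ^ 2 + ((2 * c + 1) * 4 + 4) + 1) 1
          = pvRing (c + 1) := by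
        unfold pvRing
        have e1 : (2 * c + 1) ^ 2 + 1 = (2 * (c + 1) - 1) ^ 2 + 1 := by ring
        have e2 : (2 * c + 1) ^ 2 + ((2 * c + 1) * 4 + 4) + 1 = (2 * (c + 1) + 1) ^ 2 + 1 := by ring
        rw [e1, e2]
      rw [hnext]
      exact ih (c + 1) (by omega) (by nlinarith) (by push_cast at h3; nlinarith) k hk

-- ===== VERDICT (by name: the statement is the Claim_ definition above) =====
theorem determine_layer_spec : Claim_equal_determine_layer := by
  unfold Claim_equal_determine_layer
  intro num _ hpre
  unfold Pre_determine_layer at hpre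
  unfold Spec_determine_layer
  by_cases h1 : num = 1
  · subst h1; decide
  · have h2 : 2 ≤ num := by omega
    have hfuel : num ≤ (2 * (1 + (num.toNat : Int)) + 1) ^ 2 := by
      have : (num.toNat : Int) = num := by omega
      rw [this]; nlinarith
    have hb : pvIsLayer num (pvBLoop num num.toNat 1) :=
      pvBLoop_spec num num.toNat 1 (by omega) (by norm_num; omega) hfuel
    have hA : determine_layer num = (pvBLoop num num.toNat 1, pvRing (pvBLoop num num.toNat 1)) := by
      unfold determine_layer
      have hstep : pvALoop num (num.toNat + 1) (0, [1])
          = pvALoop num num.toNat (1, pvRing 1) := by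
        simp only [pvALoop]
        rw [if_neg (by simp [h1])]
        norm_num [PySem.List.pyGetD, PySem.List.pyGet?_neg_one, pvRing]
      rw [hstep]
      exact pvALoop_spec num num.toNat 1 (by omega) (by norm_num; omega) hfuel _ hb
    rw [hA]
    unfold determine_layer_alt
    rw [if_neg h1]
    rfl
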